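-- pv_equiv track=rewrite | github.com/Arkadiy-Garber/PLOS-Biology-Review-code | gc.py | capitalizeCodon
-- ===== SOURCE A (Python) =====
-- def capitalizeCodon(codon):
--     codonOut = ''
--     for i in codon:
--         if i == "a":
--             codonOut += "A"
--         elif i == "g":
--             codonOut += "G"
--         elif i == "c":
--             codonOut += "C"
--         elif i == "t":
--             codonOut += "T"
--         elif i == "u":
--             codonOut += "U"
--         else:
--             codonOut += i
--     return codonOut
-- ===== SOURCE B (Python) =====
-- def capitalizeCodon(codon):
--     for lo, up in zip("agctu", "AGCTU"):
--         codon = codon.replace(lo, up)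
--     return codon
-- ===== Notes on version B (the rewrite author's own statement) =====
-- stated objective: idiomatic
-- what changed: Replaces A's single per-character Python loop with an if/elif chain by five staged whole-string str.replace passes, one per nucleotide letter; correct because each pass's output (uppercase letters) is never a later pass's target.
import Mathlib
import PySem

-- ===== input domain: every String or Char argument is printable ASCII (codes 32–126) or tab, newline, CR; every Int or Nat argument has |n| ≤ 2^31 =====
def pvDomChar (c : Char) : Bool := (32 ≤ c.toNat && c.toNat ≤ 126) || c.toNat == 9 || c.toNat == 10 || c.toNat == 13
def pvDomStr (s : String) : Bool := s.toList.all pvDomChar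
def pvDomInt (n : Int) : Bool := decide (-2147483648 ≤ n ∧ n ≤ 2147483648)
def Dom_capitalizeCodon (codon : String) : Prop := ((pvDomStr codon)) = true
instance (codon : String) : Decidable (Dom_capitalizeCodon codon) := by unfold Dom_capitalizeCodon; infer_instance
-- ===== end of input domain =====

-- B replaces A's single per-character loop (if/elif chain) by five staged
-- whole-string replace passes, one per nucleotide letter; same output, idiomatic.

-- ===== PORT A =====
-- Python string concatenation is modelled by a Char-list accumulator, packed with String.ofList at the end (exact on all strings).
def capitalizeCodon (codon : String) : String :=
  String.ofList (codon.toList.foldl (fun codonOut i =>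
    if i = 'a' then codonOut ++ ['A']
    else if i = 'g' then codonOut ++ ['G']
    else if i = 'c' then codonOut ++ ['C']
    else if i = 't' then codonOut ++ ['T']
    else if i = 'u' then codonOut ++ ['U']
    else codonOut ++ [i]) [])

-- ===== PORT B =====
-- for lo, up in zip("agctu", "AGCTU"): codon = codon.replace(lo, up); each
-- single-character replace is PySem.Str.replace (exact Python semantics).
def capitalizeCodon_alt (codon : String) : String :=
  (List.zip "agctu".toList "AGCTU".toList).foldl
    (fun s p => PySem.Str.replace s (String.ofList [p.1]) (String.ofList [p.2])) codon

-- ===== PRECONDITION & SPEC =====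
def Spec_capitalizeCodon (codon : String) (out : String) : Prop := out = capitalizeCodon_alt codon
instance (codon : String) (out : String) : Decidable (Spec_capitalizeCodon codon out) := by unfold Spec_capitalizeCodon; infer_instance

-- ===== CLAIM =====
def Claim_equal_capitalizeCodon : Prop := ∀ (codon : String), Dom_capitalizeCodon codon → Spec_capitalizeCodon codon (capitalizeCodon codon)

-- ===== LEMMAS AND PROOFS =====
-- go on a single-character pattern is a pointwise substitution
theorem pv_go_single (a b : Char) (fuel : Nat) (l acc : List Char) (h : l.length ≤ fuel) :
    PySem.Chars.replace.go [a] [b] fuel l acc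
      = acc.reverse ++ l.map (fun c => if c = a then b else c) := by
  induction fuel generalizing l acc with
  | zero =>
    have : l = [] := List.eq_nil_of_length_eq_zero (Nat.le_zero.mp h)
    subst this
    simp [PySem.Chars.replace.go]
  | succ fuel ih =>
    cases l with
    | nil => simp [PySem.Chars.replace.go]
    | cons c t =>
      by_cases hc : c = a
      · subst hc
        have hp : [c].isPrefixOf (c :: t) = true := by simp [List.isPrefixOf]
        simp only [PySem.Chars.replace.go, hp, if_pos]
        rw [ih _ _ (by simpa using Nat.le_of_succ_le_succ h)]
        simp
      · have hp : [a].isPrefixOf (c :: t) = false := by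
          simp [List.isPrefixOf]
          exact fun h' => absurd h'.symm hc
        simp only [PySem.Chars.replace.go]
        rw [if_neg (by simp [hp]), ih _ _ (by simpa using Nat.le_of_succ_le_succ h)]
        simp [hc]

-- replace with a single-character old/new is List.map of the substitution
theorem pv_replace_single (a b : Char) (s : List Char) :
    PySem.Chars.replace s [a] [b] = s.map (fun c => if c = a then b else c) := by
  simp only [PySem.Chars.replace, List.isEmpty_cons, Bool.false_eq_true, if_false]
  exact pv_go_single a b s.length s [] (le_refl _)

-- A's append-accumulating fold produces acc ++ the pointwise image of the chain
theorem pv_fold_eq (l : List Char) (acc : List Char) :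
    l.foldl (fun codonOut i =>
      if i = 'a' then codonOut ++ ['A']
      else if i = 'g' then codonOut ++ ['G']
      else if i = 'c' then codonOut ++ ['C']
      else if i = 't' then codonOut ++ ['T']
      else if i = 'u' then codonOut ++ ['U']
      else codonOut ++ [i]) acc
    = acc ++ l.map (fun i =>
      if i = 'a' then 'A'
      else if i = 'g' then 'G'
      else if i = 'c' then 'C'
      else if i = 't' then 'T'
      else if i = 'u' then 'U'
      else i) := by
  induction l generalizing acc with
  | nil => simp
  | cons i l ih =>
    simp only [List.foldl_cons, List.map_cons, ih]
    split_ifs <;> simp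

-- B's fold over the five zipped pairs, written out
theorem pv_alt_unfold (codon : String) :
    capitalizeCodon_alt codon
      = PySem.Str.replace (PySem.Str.replace (PySem.Str.replace (PySem.Str.replace (PySem.Str.replace
      codon (String.ofList ['a']) (String.ofList ['A'])) (String.ofList ['g']) (String.ofList ['G']))
      (String.ofList ['c']) (String.ofList ['C'])) (String.ofList ['t']) (String.ofList ['T']))
      (String.ofList ['u']) (String.ofList ['U']) := by
  simp [capitalizeCodon_alt]

-- the five composed substitutions agree with A's if/elif chain on every character
-- ===== VERDICT =====
theorem capitalizeCodon_spec : Claim_equal_capitalizeCodon := by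
  intro codon _
  unfold Spec_capitalizeCodon capitalizeCodon
  rw [pv_fold_eq]
  simp only [List.nil_append]
  rw [pv_alt_unfold]
  simp only [PySem.Str.replace, String.toList_ofList, pv_replace_single, List.map_map]
  congr 1
  apply List.map_congr_left
  intro i _
  by_cases h1 : i = 'a'
  · subst h1; decide
  · by_cases h2 : i = 'g'
    · subst h2; decide
    · by_cases h3 : i = 'c'
      · subst h3; decide
      · by_cases h4 : i = 't'
        · subst h4; decide
        · by_cases h5 : i = 'u'
          · subst h5; decide
          · simp [Function.comp, h1, h2, h3, h4, h5]
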